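-- pv_equiv track=rewrite | github.com/shan2312/DSA-Python-Solutions | DFS/rat_in_a_maze.py | get_all_paths
-- ===== SOURCE A (Python) =====
-- DIRECTIONS = [[1, 0, 'D'], [0, -1, 'L'], [0, 1, 'R'], [-1, 0, 'U']]
--
-- def get_neighbors(row, col, num_rows, num_cols):
--     for row_change, col_change, direction in DIRECTIONS:
--         neighbor_row, neighbor_col = row + row_change, col + col_change
--
--         is_row_in_bounds = neighbor_row >= 0 and neighbor_row < num_rows
--         is_col_in_bounds = neighbor_col >= 0 and neighbor_col < num_cols
--
--         if not is_row_in_bounds or not is_col_in_bounds: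
--             continue
--         yield (neighbor_row, neighbor_col, direction)
--
-- def get_all_paths(grid):
--     paths = []
--     num_rows, num_cols = len(grid), len(grid[0])
--     target_row, target_col = num_rows-1, num_cols-1
--
--     def get_all_paths_from(start_row, start_col, grid, visited_set, current_path):
--         if start_row == target_row and start_col == target_col:
--             paths.append(current_path[:])
--
--         visited_set.add((start_row, start_col))
--
--         for neighbor_row, neighbor_col, direction in get_neighbors(start_row, start_col, num_rows, num_cols):
--             if (neighbor_row,neighbor_col) in visited_set or grid[neighbor_row][neighbor_col] == 0:
--                 continue
--             current_path.append(direction)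
--             get_all_paths_from(neighbor_row, neighbor_col, grid, visited_set, current_path)
--             current_path.pop()
--
--         visited_set.remove((start_row, start_col))
--     visited_set = set()
--     get_all_paths_from(0, 0, grid, visited_set, [])
--     return paths
-- ===== SOURCE B (Python) =====
-- def get_all_paths(grid):
--     num_rows, num_cols = len(grid), len(grid[0])
--     target = (num_rows - 1, num_cols - 1)
--
--     def paths_from(r, c, visited):
--         visited = visited | {(r, c)}
--         found = [[]] if (r, c) == target else []
--         for dr, dc, d in ((1, 0, 'D'), (0, -1, 'L'), (0, 1, 'R'), (-1, 0, 'U')):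
--             nr, nc = r + dr, c + dc
--             if 0 <= nr < num_rows and 0 <= nc < num_cols \
--                     and (nr, nc) not in visited and grid[nr][nc] != 0:
--                 found += [[d] + p for p in paths_from(nr, nc, visited)]
--         return found
--
--     return paths_from(0, 0, frozenset())
-- ===== Notes on version B (the rewrite author's own statement) =====
-- stated objective: simpler
-- what changed: A threads a mutated visited set, a shared prefix path with append/pop backtracking and a nonlocal results list through a recursive generator-driven DFS; B is a pure recursion over an immutable visited set that returns the list of path suffixes from each cell and prepends directions, with bounds/visited/value checks inlined and no mutation.
-- outside the precondition, e.g. on get_all_paths([[1, 0], [0]]): A returns [], B returns []; on get_all_paths([[1, 1], [1]]): A raises IndexError, B raises IndexError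
import Mathlib
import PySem

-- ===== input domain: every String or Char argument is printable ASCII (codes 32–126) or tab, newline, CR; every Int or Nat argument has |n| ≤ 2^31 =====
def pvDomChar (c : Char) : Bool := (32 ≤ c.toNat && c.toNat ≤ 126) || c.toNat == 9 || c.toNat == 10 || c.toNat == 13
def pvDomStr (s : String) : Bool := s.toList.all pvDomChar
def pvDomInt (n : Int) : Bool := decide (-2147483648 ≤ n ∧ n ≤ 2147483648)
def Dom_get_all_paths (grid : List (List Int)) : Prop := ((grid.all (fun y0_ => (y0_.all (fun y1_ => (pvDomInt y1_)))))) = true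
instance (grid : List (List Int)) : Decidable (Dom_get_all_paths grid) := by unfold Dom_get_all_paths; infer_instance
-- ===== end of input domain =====

-- B replaces A's mutated visited set / shared path with append-pop backtracking / nonlocal
-- results list by a pure recursion returning path suffixes (objective: simpler).
-- Equivalence of return values only; A mutates nothing observable by the caller.

-- ===== PORT A =====
-- module constant DIRECTIONS (shared by both Pythons)
def pvDirections : List (Int × Int × String) := [(1, 0, "D"), (0, -1, "L"), (0, 1, "R"), (-1, 0, "U")]

-- grid[r][c]; exact on the in-bounds indices both programs use under Pre_ (the getD defaults are never reached there)
def pvCell (grid : List (List Int)) (r c : Int) : Int :=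
  (PySem.List.pyGet? ((PySem.List.pyGet? grid r).getD []) c).getD 0

-- A's generator get_neighbors, as the list of yielded triples
def get_neighbors (row col num_rows num_cols : Int) : List (Int × Int × String) :=
  pvDirections.filterMap (fun t =>
    let nr := row + t.1
    let nc := col + t.2.1
    if (0 ≤ nr ∧ nr < num_rows) ∧ (0 ≤ nc ∧ nc < num_cols) then some (nr, nc, t.2.2) else none)

-- A's inner get_all_paths_from: state (paths, visited) threaded; fuel is a totality guard only,
-- never exhausted with the fuel get_all_paths supplies (depth ≤ #cells + 1)
def aFrom (grid : List (List Int)) (num_rows num_cols target_row target_col : Int) :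
    Nat → Int → Int → PySem.Set (Int × Int) → List String → List (List String) →
    List (List String) × PySem.Set (Int × Int)
  | 0, _, _, vis, _, paths => (paths, vis)
  | fuel + 1, r, c, vis, path, paths =>
    let paths1 := if r = target_row ∧ c = target_col then paths ++ [path] else paths
    let vis1 := PySem.Set.add vis (r, c)
    let st := (get_neighbors r c num_rows num_cols).foldl
      (fun (st : List (List String) × PySem.Set (Int × Int)) n =>
        if (n.1, n.2.1) ∈ st.2 ∨ pvCell grid n.1 n.2.1 = 0 then st
        else aFrom grid num_rows num_cols target_row target_col fuel n.1 n.2.1 st.2 (path ++ [n.2.2]) st.1)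
      (paths1, vis1)
    (st.1, PySem.Set.discard st.2 (r, c))  -- visited.remove: (r,c) was just added, so remove = discard

def get_all_paths (grid : List (List Int)) : List (List String) :=
  let num_rows : Int := grid.length
  let num_cols : Int := (grid.headD []).length   -- len(grid[0]); Pre_ gives grid ≠ []
  (aFrom grid num_rows num_cols (num_rows - 1) (num_cols - 1)
      ((num_rows * num_cols).toNat + 2) 0 0 PySem.Set.empty [] []).1

-- ===== PORT B =====
-- B's paths_from: pure, immutable visited, returns the path suffixes from (r,c); same fuel guard
def bFrom (grid : List (List Int)) (num_rows num_cols target_row target_col : Int) :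
    Nat → Int → Int → PySem.Set (Int × Int) → List (List String)
  | 0, _, _, _ => []
  | fuel + 1, r, c, vis =>
    let vis1 := PySem.Set.add vis (r, c)
    let base : List (List String) := if r = target_row ∧ c = target_col then [([] : List String)] else []
    pvDirections.foldl
      (fun acc t =>
        let nr := r + t.1
        let nc := c + t.2.1
        if (0 ≤ nr ∧ nr < num_rows) ∧ (0 ≤ nc ∧ nc < num_cols) ∧ (nr, nc) ∉ vis1 ∧ pvCell grid nr nc ≠ 0
        then acc ++ (bFrom grid num_rows num_cols target_row target_col fuel nr nc vis1).map (fun p => t.2.2 :: p)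
        else acc)
      base

def get_all_paths_alt (grid : List (List Int)) : List (List String) :=
  let num_rows : Int := grid.length
  let num_cols : Int := (grid.headD []).length
  bFrom grid num_rows num_cols (num_rows - 1) (num_cols - 1)
    ((num_rows * num_cols).toNat + 2) 0 0 PySem.Set.empty

-- ===== PRECONDITION & SPEC =====
-- Pre_ excludes the empty grid (grid[0] raises IndexError) and grids with a row shorter than the
-- first row, on which A may raise IndexError when the DFS indexes a missing cell (and where the
-- walk never reaches a missing cell A returns, and B returns the same value).
def Pre_get_all_paths (grid : List (List Int)) : Prop :=
  grid ≠ [] ∧ ∀ row ∈ grid, (grid.headD []).length ≤ row.length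
instance (grid : List (List Int)) : Decidable (Pre_get_all_paths grid) := by
  unfold Pre_get_all_paths; infer_instance

def pvWitness_get_all_paths : List (List Int) := [[1, 1], [0, 1]]

def Spec_get_all_paths (grid : List (List Int)) (out : List (List String)) : Prop := out = get_all_paths_alt grid
instance (grid : List (List Int)) (out : List (List String)) : Decidable (Spec_get_all_paths grid out) := by unfold Spec_get_all_paths; infer_instance

-- ===== CLAIM (what is proved, stated in full; the proofs are below) =====
def Claim_equal_get_all_paths : Prop := ∀ (grid : List (List Int)), Dom_get_all_paths grid → Pre_get_all_paths grid → Spec_get_all_paths grid (get_all_paths grid)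

-- ===== LEMMAS AND PROOFS =====

theorem pv_discard_add (s : PySem.Set (Int × Int)) (x : Int × Int) (h : x ∉ s) :
    PySem.Set.discard (PySem.Set.add s x) x = s := by
  rw [PySem.Set.add_of_not_mem h]
  simp only [PySem.Set.discard, List.filter_append]
  have h1 : List.filter (fun y => !y == x) s = s := by
    apply List.filter_eq_self.mpr
    intro a ha
    have hne : a ≠ x := fun e => h (e ▸ ha)
    simp [hne]
  simp [h1]

-- one pass over the direction list: A's fold over the filtered neighbour list equals
-- B's fold with the bounds test inlined, given the induction hypothesis for smaller fuel
theorem pv_fold_eq (grid : List (List Int)) (num_rows num_cols target_row target_col : Int)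
    (fuel : Nat) (r c : Int) (vis1 : PySem.Set (Int × Int)) (path : List String)
    (IH : ∀ (r' c' : Int) (vis' : PySem.Set (Int × Int)) (path' : List String) (paths' : List (List String)),
      (r', c') ∉ vis' →
      aFrom grid num_rows num_cols target_row target_col fuel r' c' vis' path' paths'
        = (paths' ++ (bFrom grid num_rows num_cols target_row target_col fuel r' c' vis').map (fun p => path' ++ p), vis')) :
    ∀ (L : List (Int × Int × String)) (paths : List (List String)) (Q : List (List String)),
    (L.filterMap (fun t =>
        if (0 ≤ r + t.1 ∧ r + t.1 < num_rows) ∧ (0 ≤ c + t.2.1 ∧ c + t.2.1 < num_cols)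
        then some (r + t.1, c + t.2.1, t.2.2) else none)).foldl
      (fun (st : List (List String) × PySem.Set (Int × Int)) n =>
        if (n.1, n.2.1) ∈ st.2 ∨ pvCell grid n.1 n.2.1 = 0 then st
        else aFrom grid num_rows num_cols target_row target_col fuel n.1 n.2.1 st.2 (path ++ [n.2.2]) st.1)
      (paths ++ Q.map (fun p => path ++ p), vis1)
    = (paths ++ (L.foldl
        (fun acc t =>
          if (0 ≤ r + t.1 ∧ r + t.1 < num_rows) ∧ (0 ≤ c + t.2.1 ∧ c + t.2.1 < num_cols)
              ∧ (r + t.1, c + t.2.1) ∉ vis1 ∧ pvCell grid (r + t.1) (c + t.2.1) ≠ 0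
          then acc ++ (bFrom grid num_rows num_cols target_row target_col fuel (r + t.1) (c + t.2.1) vis1).map (fun p => t.2.2 :: p)
          else acc)
        Q).map (fun p => path ++ p), vis1) := by
  intro L
  induction L with
  | nil => intro paths Q; simp
  | cons t L ihL =>
    intro paths Q
    obtain ⟨dr, dc, d⟩ := t
    by_cases hb : (0 ≤ r + dr ∧ r + dr < num_rows) ∧ (0 ≤ c + dc ∧ c + dc < num_cols)
    · by_cases hm : (r + dr, c + dc) ∈ vis1
      · simp only [List.filterMap_cons, List.foldl_cons]
        rw [if_pos hb]
        simp only [List.foldl_cons]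
        rw [if_pos (Or.inl hm)]
        rw [if_neg (by simp [hm])]
        exact ihL paths Q
      · by_cases hz : pvCell grid (r + dr) (c + dc) = 0
        · simp only [List.filterMap_cons, List.foldl_cons]
          rw [if_pos hb]
          simp only [List.foldl_cons]
          rw [if_pos (Or.inr hz)]
          rw [if_neg (by simp [hz])]
          exact ihL paths Q
        · simp only [List.filterMap_cons, List.foldl_cons]
          rw [if_pos hb]
          simp only [List.foldl_cons]
          rw [if_neg (by simp [hm, hz])]
          rw [if_pos ⟨hb.1, hb.2, hm, hz⟩]
          rw [IH (r + dr) (c + dc) vis1 (path ++ [d]) (paths ++ Q.map (fun p => path ++ p)) hm]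
          have hsh : paths ++ Q.map (fun p => path ++ p)
              ++ (bFrom grid num_rows num_cols target_row target_col fuel (r + dr) (c + dc) vis1).map (fun p => (path ++ [d]) ++ p)
              = paths ++ (Q ++ (bFrom grid num_rows num_cols target_row target_col fuel (r + dr) (c + dc) vis1).map (fun p => d :: p)).map (fun p => path ++ p) := by
            simp [List.map_map, Function.comp, List.append_assoc]
          rw [hsh]
          exact ihL paths _
    · simp only [List.filterMap_cons]
      rw [if_neg hb]
      simp only [List.foldl_cons]
      rw [if_neg (by intro h; exact hb ⟨h.1, h.2.1⟩)]
      exact ihL paths Q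

theorem pv_aFrom_eq (grid : List (List Int)) (num_rows num_cols target_row target_col : Int) :
    ∀ (fuel : Nat) (r c : Int) (vis : PySem.Set (Int × Int)) (path : List String) (paths : List (List String)),
    (r, c) ∉ vis →
    aFrom grid num_rows num_cols target_row target_col fuel r c vis path paths
      = (paths ++ (bFrom grid num_rows num_cols target_row target_col fuel r c vis).map (fun p => path ++ p), vis) := by
  intro fuel
  induction fuel with
  | zero => intro r c vis path paths _; simp [aFrom, bFrom]
  | succ fuel IH =>
    intro r c vis path paths hrc
    simp only [aFrom, bFrom, get_neighbors]
    rw [show (if r = target_row ∧ c = target_col then paths ++ [path] else paths)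
        = paths ++ (if r = target_row ∧ c = target_col then [([] : List String)] else ([] : List (List String))).map (fun p => path ++ p) from by
      split <;> simp]
    rw [pv_fold_eq grid num_rows num_cols target_row target_col fuel r c (PySem.Set.add vis (r, c)) path IH pvDirections paths _]
    rw [pv_discard_add vis (r, c) hrc]

-- ===== VERDICT (by name: the statement is the Claim_ definition above) =====
theorem get_all_paths_spec : Claim_equal_get_all_paths := by
  intro grid _ _
  unfold Spec_get_all_paths
  simp only [get_all_paths, get_all_paths_alt]
  rw [pv_aFrom_eq grid (grid.length : Int) ((grid.headD []).length : Int) _ _ _ 0 0 PySem.Set.empty [] [] (by simp [PySem.Set.empty])]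
  simp
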